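-- pv_equiv track=rewrite | github.com/Karlsx/cyberdog_ros2 | cyberdog_common/common_protocol/tools/idl.py | get_0bmask
-- ===== SOURCE A (Python) =====
-- def get_0bmask(h: int, l: int, len: int = 8) -> str:
--     out = '0b'
--     for i in range(len - 1, -1, -1):
--         if (h >= i >= l):
--             out += '1'
--         else:
--             out += '0'
--     return out
-- ===== SOURCE B (Python) =====
-- def get_0bmask(h: int, l: int, len: int = 8) -> str:
--     hi = min(h, len - 1)
--     lo = max(l, 0)
--     if len > 0 and hi >= lo:
--         return '0b' + '0' * (len - 1 - hi) + '1' * (hi - lo + 1) + '0' * lo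
--     return '0b' + '0' * max(len, 0)
-- ===== Notes on version B (the rewrite author's own statement) =====
-- stated objective: simpler
-- what changed: B replaces the per-bit countdown loop by a closed form: it clips the interval to [max(l,0), min(h,len-1)] and builds the mask from three character repetitions ('0'*leading + '1'*run + '0'*trailing), with an all-zero string when the clipped interval is empty or len <= 0.
import Mathlib
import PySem

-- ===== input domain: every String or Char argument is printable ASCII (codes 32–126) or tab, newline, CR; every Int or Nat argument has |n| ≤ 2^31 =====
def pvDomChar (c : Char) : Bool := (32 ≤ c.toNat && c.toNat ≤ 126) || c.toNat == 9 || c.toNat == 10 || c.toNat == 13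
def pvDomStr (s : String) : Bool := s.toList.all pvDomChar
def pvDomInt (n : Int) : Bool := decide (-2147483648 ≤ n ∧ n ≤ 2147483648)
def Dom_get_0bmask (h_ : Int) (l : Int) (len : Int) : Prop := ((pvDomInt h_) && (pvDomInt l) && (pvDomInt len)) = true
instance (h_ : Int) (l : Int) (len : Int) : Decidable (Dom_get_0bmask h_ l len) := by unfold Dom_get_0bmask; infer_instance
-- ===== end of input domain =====

-- B replaces the per-bit loop by a closed form that assembles the '0'/'1' runs of the clipped interval (simpler).

-- ===== PORT A =====
def get_0bmask (h_ : Int) (l : Int) (len : Int) : String :=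
  (PySem.List.pyRange (len - 1) (-1) (-1)).foldl
    (fun out i => out ++ (if i ≤ h_ ∧ l ≤ i then "1" else "0")) "0b"

-- ===== PORT B =====
-- '0' * k with a possibly negative k: empty for k ≤ 0, exactly as in Python
def pyRep (n : Int) (c : Char) : String := String.ofList (List.replicate n.toNat c)

def get_0bmask_alt (h_ : Int) (l : Int) (len : Int) : String :=
  let hi := min h_ (len - 1)
  let lo := max l 0
  if 0 < len ∧ lo ≤ hi then
    "0b" ++ pyRep (len - 1 - hi) '0' ++ pyRep (hi - lo + 1) '1' ++ pyRep lo '0'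
  else
    "0b" ++ pyRep (max len 0) '0'

-- ===== PRECONDITION & SPEC =====
def Spec_get_0bmask (h_ : Int) (l : Int) (len : Int) (out : String) : Prop := out = get_0bmask_alt h_ l len
instance (h_ : Int) (l : Int) (len : Int) (out : String) : Decidable (Spec_get_0bmask h_ l len out) := by unfold Spec_get_0bmask; infer_instance

-- ===== CLAIM (what is proved, stated in full; the proofs are below) =====
def Claim_equal_get_0bmask : Prop := ∀ (h_ : Int) (l : Int) (len : Int), Dom_get_0bmask h_ l len → Spec_get_0bmask h_ l len (get_0bmask h_ l len)

-- ===== LEMMAS AND PROOFS =====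

-- A's loop appends one character per index: it is "0b" followed by the mapped bits.
theorem foldl_bits {p : Int → Prop} [DecidablePred p] (xs : List Int) (s : String) :
    xs.foldl (fun out i => out ++ (if p i then "1" else "0")) s
      = s ++ String.ofList (xs.map fun i => if p i then '1' else '0') := by
  induction xs generalizing s with
  | nil => simp
  | cons a xs ih =>
    rw [List.foldl_cons, ih, List.map_cons]
    split_ifs <;> rw [String.append_assoc] <;> congr 1
    · rw [show ("1" : String) = String.ofList ['1'] from rfl, ← String.ofList_append,
        List.singleton_append]
    · rw [show ("0" : String) = String.ofList ['0'] from rfl, ← String.ofList_append,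
        List.singleton_append]

-- the bit list for n bits equals the three replicate runs of B
theorem mask_list (h_ l : Int) (n : Nat) :
    (List.range n).map (fun k : Nat => if ((n : Int) - 1 - (k : Int) ≤ h_ ∧ l ≤ (n : Int) - 1 - (k : Int)) then '1' else '0')
      = if 0 < (n : Int) ∧ max l 0 ≤ min h_ ((n : Int) - 1) then
          List.replicate ((n : Int) - 1 - min h_ ((n : Int) - 1)).toNat '0'
            ++ List.replicate (min h_ ((n : Int) - 1) - max l 0 + 1).toNat '1'
            ++ List.replicate (max l 0).toNat '0'
        else List.replicate n '0' := by
  induction n with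
  | zero => simp
  | succ n ih =>
    have hc1 : ((n + 1 : Nat) : Int) = (n : Int) + 1 := by push_cast; ring
    rw [List.range_succ_eq_map, List.map_cons, List.map_map]
    have hfun : ((fun k : Nat => if (((n + 1 : Nat) : Int) - 1 - (k : Int) ≤ h_ ∧ l ≤ ((n + 1 : Nat) : Int) - 1 - (k : Int)) then '1' else '0') ∘ Nat.succ)
        = fun k : Nat => if ((n : Int) - 1 - (k : Int) ≤ h_ ∧ l ≤ (n : Int) - 1 - (k : Int)) then '1' else '0' := by
      funext k
      have e : ((n + 1 : Nat) : Int) - 1 - ((Nat.succ k : Nat) : Int) = (n : Int) - 1 - (k : Int) := by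
        push_cast; ring
      simp only [Function.comp_apply, e]
    rw [hfun, ih]
    simp only [hc1, Nat.cast_zero, add_sub_cancel_right, sub_zero]
    by_cases hA : (n : Int) ≤ h_ ∧ l ≤ (n : Int)
    · -- bit n is '1'
      have hhi : min h_ (n : Int) = (n : Int) := by omega
      by_cases hB : 0 < (n : Int) ∧ max l 0 ≤ min h_ ((n : Int) - 1)
      · rw [if_pos ⟨hA.1, hA.2⟩, if_pos hB, if_pos ⟨by omega, by omega⟩]
        have e0 : ((n : Int) - min h_ (n : Int)).toNat = 0 := by omega
        have e0' : ((n : Int) - 1 - min h_ ((n : Int) - 1)).toNat = 0 := by omega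
        have e1 : (min h_ (n : Int) - max l 0 + 1).toNat
            = (min h_ ((n : Int) - 1) - max l 0 + 1).toNat + 1 := by omega
        rw [e0, e0', e1]
        simp [List.replicate_succ]
      · have hlo : max l 0 = (n : Int) := by omega
        rw [if_pos ⟨hA.1, hA.2⟩, if_neg hB, if_pos ⟨by omega, by omega⟩]
        have e0 : ((n : Int) - min h_ (n : Int)).toNat = 0 := by omega
        have e1 : (min h_ (n : Int) - max l 0 + 1).toNat = 1 := by omega
        have e2 : (max l 0).toNat = n := by omega
        rw [e0, e1, e2]
        simp [List.replicate_succ]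
    · -- bit n is '0'
      rw [if_neg hA]
      by_cases hB : 0 < ((n : Int) + 1) ∧ max l 0 ≤ min h_ (n : Int)
      · have hh : h_ < (n : Int) := by omega
        have hB' : 0 < (n : Int) ∧ max l 0 ≤ min h_ ((n : Int) - 1) := ⟨by omega, by omega⟩
        rw [if_pos hB, if_pos hB']
        have e0 : ((n : Int) - min h_ (n : Int)).toNat
            = ((n : Int) - 1 - min h_ ((n : Int) - 1)).toNat + 1 := by omega
        have ehi : min h_ (n : Int) = h_ := by omega
        have ehi' : min h_ ((n : Int) - 1) = h_ := by omega
        rw [e0, ehi, ehi', List.replicate_succ]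
        simp
      · have hB' : ¬ (0 < (n : Int) ∧ max l 0 ≤ min h_ ((n : Int) - 1)) := by omega
        rw [if_neg hB, if_neg hB']
        simp [List.replicate_succ]

-- ===== VERDICT (by name: the statement is the Claim_ definition above) =====
theorem get_0bmask_spec : Claim_equal_get_0bmask := by
  intro h_ l len _
  unfold Spec_get_0bmask get_0bmask get_0bmask_alt
  rw [PySem.List.pyRange_neg_one, foldl_bits, List.map_map]
  by_cases hlen : 0 < len
  · have hn : ((len - 1 - -1).toNat : Int) = len := by omega
    have key := mask_list h_ l (len - 1 - -1).toNat
    rw [hn] at key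
    have hfun : ((fun i => if i ≤ h_ ∧ l ≤ i then '1' else '0') ∘ fun k : Nat => len - 1 - (k : Int))
        = (fun k : Nat => if (len - 1 - (k : Int) ≤ h_ ∧ l ≤ len - 1 - (k : Int)) then '1' else '0') := rfl
    rw [hfun, key]
    simp only [pyRep]
    split_ifs with hc
    · simp only [String.ofList_append, String.append_assoc]
    · have : (max len 0).toNat = (len - 1 - -1).toNat := by omega
      rw [this]
  · have h0 : (len - 1 - -1).toNat = 0 := by omega
    rw [h0, if_neg (by omega)]
    have : (max len 0).toNat = 0 := by omega
    simp [pyRep, this]
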